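-- pv_equiv track=rewrite | github.com/SRodi/ml-regression | p3.py | num_coefficients_3
-- ===== SOURCE A (Python) =====
-- def num_coefficients_3(d):
--     t = 0
--     for n in range(d+1):
--         for i in range(n+1):
--             for j in range(n+1):
--                 for k in range(n+1):
--                     if i+j+k == n:
--                         t = t+1
--     return t
-- ===== SOURCE B (Python) =====
-- def num_coefficients_3(d):
--     # monomials of degree exactly n in 3 vars: C(n+2,2); summed over n<=d gives C(d+3,3)
--     if d < 0:
--         return 0
--     return (d + 1) * (d + 2) * (d + 3) // 6
-- ===== Notes on version B (the rewrite author's own statement) =====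
-- stated objective: faster
-- what changed: Replaced the quadruple nested loop counting lattice triples by the closed-form binomial C(d+3,3) = (d+1)(d+2)(d+3)//6 (0 for negative d).
import Mathlib
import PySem

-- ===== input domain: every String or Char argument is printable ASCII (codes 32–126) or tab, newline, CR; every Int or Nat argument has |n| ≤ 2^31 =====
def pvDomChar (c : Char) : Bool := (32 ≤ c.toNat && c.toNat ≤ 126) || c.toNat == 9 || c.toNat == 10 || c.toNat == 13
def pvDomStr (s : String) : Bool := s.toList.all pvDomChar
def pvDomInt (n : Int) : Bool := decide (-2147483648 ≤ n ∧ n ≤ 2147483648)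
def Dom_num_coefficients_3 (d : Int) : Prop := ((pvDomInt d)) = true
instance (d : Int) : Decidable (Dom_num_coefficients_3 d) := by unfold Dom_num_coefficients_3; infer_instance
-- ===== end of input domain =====

-- B replaces A's quadruple nested counting loop by the closed form (d+1)(d+2)(d+3)//6 (0 for d < 0); objective: faster.

-- ===== PORT A =====
def num_coefficients_3 (d : Int) : Int :=
  (PySem.List.pyRange 0 (d + 1) 1).foldl (fun t n =>
    (PySem.List.pyRange 0 (n + 1) 1).foldl (fun t i =>
      (PySem.List.pyRange 0 (n + 1) 1).foldl (fun t j =>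
        (PySem.List.pyRange 0 (n + 1) 1).foldl (fun t k =>
          if i + j + k = n then t + 1 else t) t) t) t) 0

-- ===== PORT B =====
def num_coefficients_3_alt (d : Int) : Int :=
  if d < 0 then 0 else PySem.Int.floordiv ((d + 1) * (d + 2) * (d + 3)) 6

-- ===== PRECONDITION & SPEC =====
def Spec_num_coefficients_3 (d : Int) (out : Int) : Prop := out = num_coefficients_3_alt d
instance (d : Int) (out : Int) : Decidable (Spec_num_coefficients_3 d out) := by unfold Spec_num_coefficients_3; infer_instance

-- ===== CLAIM (what is proved, stated in full; the proofs are below) =====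
def Claim_equal_num_coefficients_3 : Prop := ∀ (d : Int), Dom_num_coefficients_3 d → Spec_num_coefficients_3 d (num_coefficients_3 d)

-- ===== LEMMAS AND PROOFS =====

-- innermost k-loop: exactly one k satisfies i+j+k = n, namely n-i-j, and it lies in [0,n] iff 0 ≤ i+j ≤ n
theorem pv_kloop (n i j t : Int) :
    (PySem.List.pyRange 0 (n + 1) 1).foldl (fun t k => if i + j + k = n then t + 1 else t) t
      = t + if 0 ≤ i + j ∧ i + j ≤ n then 1 else 0 := by
  rw [PySem.List.foldl_ite_add_one]
  congr 1
  have hp : (fun k => decide (i + j + k = n)) = (fun k => k == n - i - j) := by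
    funext k; rw [Bool.eq_iff_iff]; simp only [beq_iff_eq, decide_eq_true_eq]; omega
  rw [hp]
  change ((PySem.List.pyRange 0 (n + 1) 1).count (n - i - j) : Int) = _
  by_cases h : 0 ≤ i + j ∧ i + j ≤ n
  · rw [List.count_eq_one_of_mem (PySem.List.nodup_pyRange_one 0 (n + 1))]
    · simp [h]
    · rw [PySem.List.mem_pyRange_one]; omega
  · rw [List.count_eq_zero_of_not_mem]
    · simp [h]
    · rw [PySem.List.mem_pyRange_one]; omega

-- a List.range sum is a Finset.range sum (definitional)
theorem pv_sum_list {M : Type} [AddCommMonoid M] (m : ℕ) (f : ℕ → M) :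
    ((List.range m).map f).sum = ∑ x ∈ Finset.range m, f x := rfl

-- j-loop: sum of the indicators over j ∈ [0,n] is n - i + 1 when 0 ≤ i ≤ n
theorem pv_jloop (n i t : Int) (h0 : 0 ≤ i) (h1 : i ≤ n) :
    (PySem.List.pyRange 0 (n + 1) 1).foldl (fun t j => t + if 0 ≤ i + j ∧ i + j ≤ n then 1 else 0) t
      = t + (n - i + 1) := by
  rw [PySem.List.foldl_add]
  congr 1
  rw [PySem.List.pyRange_one, List.map_map, pv_sum_list]
  have key : ∀ x ∈ Finset.range (n + 1 - 0).toNat,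
      (if 0 ≤ i + (0 + (x : Int)) ∧ i + (0 + (x : Int)) ≤ n then (1 : Int) else 0)
        = if x < (n - i).toNat + 1 then 1 else 0 := by
    intro x hx
    split_ifs with h h2 h2 <;> first | rfl | omega
  simp only [Function.comp]
  rw [Finset.sum_congr rfl key, Finset.sum_boole]
  have hf : (Finset.range (n + 1 - 0).toNat).filter (fun x => x < (n - i).toNat + 1)
      = Finset.range ((n - i).toNat + 1) := by
    ext y; simp only [Finset.mem_filter, Finset.mem_range]; omega
  rw [hf, Finset.card_range]
  push_cast
  omega

-- i-loop becomes a Finset.range sum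
theorem pv_iloop (n t : Int) :
    (PySem.List.pyRange 0 (n + 1) 1).foldl (fun t i => t + (n - i + 1)) t
      = t + ∑ i ∈ Finset.range (n + 1).toNat, ((n : Int) - i + 1) := by
  rw [PySem.List.foldl_add]
  congr 1
  rw [PySem.List.pyRange_one, List.map_map, pv_sum_list]
  simp only [Function.comp, zero_add, sub_zero]

theorem pv_sumI (N : ℕ) :
    2 * ∑ i ∈ Finset.range (N + 1), ((N : Int) - i + 1) = ((N : Int) + 1) * ((N : Int) + 2) := by
  induction N with
  | zero => norm_num [Finset.sum_range_succ]
  | succ N ih =>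
    rw [Finset.sum_range_succ]
    have step : ∀ i ∈ Finset.range (N + 1), ((N + 1 : ℕ) : Int) - i + 1 = ((N : Int) - i + 1) + 1 := by
      intro i _; push_cast; ring
    rw [Finset.sum_congr rfl step, Finset.sum_add_distrib, Finset.sum_const, Finset.card_range]
    push_cast
    linear_combination ih

theorem pv_sumN (m : ℕ) :
    6 * ∑ n ∈ Finset.range m, (∑ i ∈ Finset.range (n + 1), ((n : Int) - i + 1))
      = (m : Int) * ((m : Int) + 1) * ((m : Int) + 2) := by
  induction m with
  | zero => simp
  | succ m ih =>
    rw [Finset.sum_range_succ, mul_add]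
    have h2 := pv_sumI m
    push_cast
    linear_combination ih + 3 * h2

-- A's quadruple loop, for d ≥ 0, is the double Finset sum ∑ₙ∑ᵢ (n-i+1)
theorem pv_A_eq (d : Int) (hd : 0 ≤ d) :
    num_coefficients_3 d
      = ∑ n ∈ Finset.range (d + 1).toNat, ∑ i ∈ Finset.range (n + 1), ((n : Int) - i + 1) := by
  unfold num_coefficients_3
  have outer : ∀ (t nn : Int), nn ∈ PySem.List.pyRange 0 (d + 1) 1 →
      (PySem.List.pyRange 0 (nn + 1) 1).foldl (fun t i =>
        (PySem.List.pyRange 0 (nn + 1) 1).foldl (fun t j =>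
          (PySem.List.pyRange 0 (nn + 1) 1).foldl (fun t k =>
            if i + j + k = nn then t + 1 else t) t) t) t
      = t + ∑ i ∈ Finset.range (nn + 1).toNat, ((nn : Int) - i + 1) := by
    intro t nn hnn
    simp only [pv_kloop]
    rw [PySem.List.foldl_congr_mem (g := fun t i => t + (nn - i + 1))]
    · exact pv_iloop nn t
    · intro acc i hi
      rw [PySem.List.mem_pyRange_one] at hi
      exact pv_jloop nn i acc hi.1 (by omega)
  have step1 := PySem.List.foldl_congr_mem (PySem.List.pyRange 0 (d + 1) 1) _
    (fun t nn => t + ∑ i ∈ Finset.range (nn + 1).toNat, ((nn : Int) - i + 1)) 0 outer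
  rw [step1, PySem.List.foldl_add, PySem.List.pyRange_one, List.map_map, pv_sum_list]
  rw [zero_add]
  apply Finset.sum_congr
  · congr 1; omega
  · intro n _
    have h1 : ((n : Int) + 1).toNat = n + 1 := by omega
    simp only [Function.comp, zero_add, h1]

theorem pv_main (d : Int) : num_coefficients_3 d = num_coefficients_3_alt d := by
  by_cases hd : d < 0
  · unfold num_coefficients_3 num_coefficients_3_alt
    rw [PySem.List.pyRange_one_eq_nil (by omega)]
    simp [hd]
  · have hd' : 0 ≤ d := by omega
    rw [pv_A_eq d hd']
    unfold num_coefficients_3_alt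
    rw [if_neg hd]
    have h6 := pv_sumN (d + 1).toNat
    have hm : (((d + 1).toNat : ℕ) : Int) = d + 1 := by omega
    rw [hm] at h6
    rw [PySem.Int.floordiv_eq_ediv_of_pos (by norm_num)]
    have hfac : (d + 1) * (d + 2) * (d + 3)
        = 6 * ∑ n ∈ Finset.range (d + 1).toNat, ∑ i ∈ Finset.range (n + 1), ((n : Int) - i + 1) := by
      rw [h6]; ring
    rw [hfac, Int.mul_ediv_cancel_left _ (by norm_num)]

-- ===== VERDICT (by name: the statement is the Claim_ definition above) =====
theorem num_coefficients_3_spec : Claim_equal_num_coefficients_3 := by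
  intro d _
  unfold Spec_num_coefficients_3
  exact pv_main d
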